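-- pv_equiv track=rewrite | github.com/szymonsztuka/study | src/python/texit/mitches/mitch_fields.py | decode_bitfield
-- ===== SOURCE A (Python) =====
-- def decode_bitfield(data, start, length):
--         result = []
--         for i in range(7, -1, -1):
--             if data[start] & (1 << i) == 0:
--                 result.append('0')
--             else:
--                 result.append('1')
--         return result
-- ===== SOURCE B (Python) =====
-- def decode_bitfield(data, start, length):
--     return list(format(data[start] & 0xFF, '08b'))
-- ===== Notes on version B (the rewrite author's own statement) =====
-- stated objective: idiomatic
-- what changed: Replaces the 8-iteration per-bit masking loop with a closed-form conversion: mask the byte with & 0xFF and let format(.., '08b') produce the MSB-first 8-character string in one step.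
import Mathlib
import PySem

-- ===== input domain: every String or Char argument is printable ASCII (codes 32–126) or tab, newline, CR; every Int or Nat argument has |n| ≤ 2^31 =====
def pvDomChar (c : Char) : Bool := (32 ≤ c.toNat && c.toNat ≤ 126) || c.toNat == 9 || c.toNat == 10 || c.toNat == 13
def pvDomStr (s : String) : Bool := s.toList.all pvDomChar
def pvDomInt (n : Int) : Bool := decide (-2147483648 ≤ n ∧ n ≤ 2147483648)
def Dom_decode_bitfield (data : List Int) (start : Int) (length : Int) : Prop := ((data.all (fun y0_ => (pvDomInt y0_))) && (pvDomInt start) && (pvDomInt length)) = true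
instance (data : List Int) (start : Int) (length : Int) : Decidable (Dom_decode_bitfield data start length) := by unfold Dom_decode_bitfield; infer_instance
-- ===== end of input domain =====

-- B replaces A's 8-iteration per-bit masking loop with a closed-form conversion of the
-- masked byte (data[start] & 0xFF) to its 8-digit MSB-first binary string (format '08b').


-- ===== PORT A =====
-- for i in range(7, -1, -1): append '0' if data[start] & (1 << i) == 0 else '1'
-- (i runs over 7..0, so i.toNat is exact; Python's 1 << i is the Nat shift 1 <<< i.toNat, cast to Int)
def decode_bitfield (data : List Int) (start : Int) (length : Int) : List String :=
  (PySem.List.pyRange 7 (-1) (-1)).foldl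
    (fun result i =>
      if PySem.Int.band (PySem.List.pyGetD data start 0) ((1 <<< i.toNat : Nat) : Int) = 0
      then result ++ ["0"]
      else result ++ ["1"]) []

-- ===== PORT B =====
-- hand port of format(v, '08b') for 0 ≤ v < 256: 8 binary digits, built back-to-front (exact there)
def fmt08b : Nat → Nat → List Char → List Char
  | 0, _, acc => acc
  | k + 1, v, acc => fmt08b k (v / 2) ((if v % 2 = 1 then '1' else '0') :: acc)

-- list(format(data[start] & 0xFF, '08b'))
def decode_bitfield_alt (data : List Int) (start : Int) (length : Int) : List String :=
  (fmt08b 8 (PySem.Int.band (PySem.List.pyGetD data start 0) 255).toNat []).map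
    (fun c => String.ofList [c])

-- ===== PRECONDITION & SPEC =====
-- A raises IndexError iff data[start] is out of range (negative indices count from the end)
def Pre_decode_bitfield (data : List Int) (start : Int) (length : Int) : Prop :=
  PySem.Raise.InRange data.length start
instance (data : List Int) (start : Int) (length : Int) : Decidable (Pre_decode_bitfield data start length) := by unfold Pre_decode_bitfield; infer_instance

def pvWitness_decode_bitfield : List Int × Int × Int := ([173, 5], 0, 8)

def Spec_decode_bitfield (data : List Int) (start : Int) (length : Int) (out : List String) : Prop := out = decode_bitfield_alt data start length
instance (data : List Int) (start : Int) (length : Int) (out : List String) : Decidable (Spec_decode_bitfield data start length out) := by unfold Spec_decode_bitfield; infer_instance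

-- ===== CLAIM (what is proved, stated in full; the proofs are below) =====
def Claim_equal_decode_bitfield : Prop := ∀ (data : List Int) (start : Int) (length : Int), Dom_decode_bitfield data start length → Pre_decode_bitfield data start length → Spec_decode_bitfield data start length (decode_bitfield data start length)

-- ===== LEMMAS AND PROOFS =====

-- the Python value of n & 0xFF, as a Nat (the low byte in two's complement)
def byteOf (n : Int) : Nat :=
  if 0 ≤ n then n.toNat % 256 else 255 - (-n - 1).toNat % 256

lemma byteOf_lt (n : Int) : byteOf n < 256 := by
  unfold byteOf; split <;> omega

-- B's mask: n & 255 = byteOf n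
lemma band_255 (n : Int) : PySem.Int.band n 255 = (byteOf n : Int) := by
  have h255 : (255 : Int).toNat = 2 ^ 8 - 1 := rfl
  by_cases h : 0 ≤ n
  · have hband : PySem.Int.band n 255 = ((n.toNat &&& (2 ^ 8 - 1) : Nat) : Int) := by
      simp only [PySem.Int.band, if_pos h, if_pos (by norm_num : (0:Int) ≤ 255), h255]
    rw [hband, Nat.and_two_pow_sub_one_eq_mod]
    unfold byteOf; rw [if_pos h]
  · have hband : PySem.Int.band n 255 =
        ((2 ^ 8 - 1 - ((2 ^ 8 - 1) &&& (-n - 1).toNat) : Nat) : Int) := by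
      simp only [PySem.Int.band, if_neg h, if_pos (by norm_num : (0:Int) ≤ 255), h255]
    rw [hband, Nat.and_comm, Nat.and_two_pow_sub_one_eq_mod]
    unfold byteOf; rw [if_neg h]; norm_num

-- for v < 256, 255 - v flips the low 8 bits
set_option maxRecDepth 20000 in
lemma testBit_255_sub (v p : Nat) (hv : v < 256) (hp : p < 8) :
    (255 - v).testBit p = !v.testBit p := by
  have : ∀ (v : Fin 256) (p : Fin 8), (255 - v.val).testBit p.val = !v.val.testBit p.val := by decide
  exact this ⟨v, hv⟩ ⟨p, hp⟩

-- A's bit test, expressed on byteOf n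
lemma band_two_pow (n : Int) (p : Nat) (hp : p < 8) :
    (PySem.Int.band n ((2 ^ p : Nat) : Int) = 0) ↔ (byteOf n).testBit p = false := by
  have hnn : (0 : Int) ≤ ((2 ^ p : Nat) : Int) := Int.natCast_nonneg _
  have htn : ((2 ^ p : Nat) : Int).toNat = 2 ^ p := Int.toNat_natCast _
  have hpos : (0 : Nat) < 2 ^ p := Nat.two_pow_pos p
  by_cases h : 0 ≤ n
  · have hband : PySem.Int.band n ((2 ^ p : Nat) : Int) = ((n.toNat &&& 2 ^ p : Nat) : Int) := by
      simp only [PySem.Int.band, if_pos h, if_pos hnn, htn]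
    rw [hband, Nat.and_two_pow]
    unfold byteOf
    rw [if_pos h, show (256:Nat) = 2 ^ 8 from rfl, Nat.testBit_mod_two_pow]
    cases hb : n.toNat.testBit p <;> simp [hb, hp]
  · have hband : PySem.Int.band n ((2 ^ p : Nat) : Int) =
        ((2 ^ p - (2 ^ p &&& (-n - 1).toNat) : Nat) : Int) := by
      simp only [PySem.Int.band, if_neg h, if_pos hnn, htn]
    rw [hband, Nat.and_comm, Nat.and_two_pow]
    unfold byteOf; rw [if_neg h]
    rw [testBit_255_sub _ p (by omega) hp, show (256:Nat) = 2 ^ 8 from rfl,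
       Nat.testBit_mod_two_pow]
    cases hb : (-n - 1).toNat.testBit p <;> simp [hb, hp]

-- the finite core: for every byte v, A's 8 bit tests give exactly B's 8 formatted digits
set_option maxRecDepth 100000 in
lemma core (v : Nat) (hv : v < 256) :
    [if v.testBit 7 = false then "0" else "1",
     if v.testBit 6 = false then "0" else "1",
     if v.testBit 5 = false then "0" else "1",
     if v.testBit 4 = false then "0" else "1",
     if v.testBit 3 = false then "0" else "1",
     if v.testBit 2 = false then "0" else "1",
     if v.testBit 1 = false then "0" else "1",
     if v.testBit 0 = false then "0" else "1"] =
    (fmt08b 8 v []).map (fun c => String.ofList [c]) := by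
  have : ∀ (v : Fin 256),
      [if (v : Nat).testBit 7 = false then "0" else "1",
       if (v : Nat).testBit 6 = false then "0" else "1",
       if (v : Nat).testBit 5 = false then "0" else "1",
       if (v : Nat).testBit 4 = false then "0" else "1",
       if (v : Nat).testBit 3 = false then "0" else "1",
       if (v : Nat).testBit 2 = false then "0" else "1",
       if (v : Nat).testBit 1 = false then "0" else "1",
       if (v : Nat).testBit 0 = false then "0" else "1"] =
      (fmt08b 8 (v : Nat) []).map (fun c => String.ofList [c]) := by decide
  exact this ⟨v, hv⟩

-- ===== VERDICT (by name: the statement is the Claim_ definition above) =====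
theorem decode_bitfield_spec : Claim_equal_decode_bitfield := by
  intro data start length _ _
  unfold Spec_decode_bitfield decode_bitfield decode_bitfield_alt
  set n := PySem.List.pyGetD data start 0 with hn
  have hrange : PySem.List.pyRange 7 (-1) (-1) = [7, 6, 5, 4, 3, 2, 1, 0] := by decide
  rw [hrange]
  have hstep :
      (fun (result : List String) (i : Int) =>
        if PySem.Int.band n ((1 <<< i.toNat : Nat) : Int) = 0
        then result ++ ["0"] else result ++ ["1"]) =
      (fun result i =>
        result ++ [if PySem.Int.band n ((1 <<< i.toNat : Nat) : Int) = 0 then "0" else "1"]) := by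
    funext r i; split <;> rfl
  rw [hstep, PySem.List.foldl_append_singleton_eq_map]
  rw [band_255, Int.toNat_natCast]
  have hb : ∀ p : Nat, p < 8 →
      (if PySem.Int.band n ((1 <<< p : Nat) : Int) = 0 then "0" else "1") =
      (if (byteOf n).testBit p = false then "0" else "1") := by
    intro p hp
    have hpow : ((1 <<< p : Nat) : Int) = ((2 ^ p : Nat) : Int) := by
      rw [Nat.shiftLeft_eq, one_mul]
    rw [hpow]
    by_cases hz : PySem.Int.band n ((2 ^ p : Nat) : Int) = 0
    · rw [if_pos hz, if_pos ((band_two_pow n p hp).mp hz)]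
    · rw [if_neg hz, if_neg (fun hc => hz ((band_two_pow n p hp).mpr hc))]
  simp only [List.map, List.nil_append]
  rw [show ((7:Int).toNat) = 7 from rfl, show ((6:Int).toNat) = 6 from rfl,
      show ((5:Int).toNat) = 5 from rfl, show ((4:Int).toNat) = 4 from rfl,
      show ((3:Int).toNat) = 3 from rfl, show ((2:Int).toNat) = 2 from rfl,
      show ((1:Int).toNat) = 1 from rfl, show ((0:Int).toNat) = 0 from rfl]
  rw [hb 7 (by omega), hb 6 (by omega), hb 5 (by omega), hb 4 (by omega),
      hb 3 (by omega), hb 2 (by omega), hb 1 (by omega), hb 0 (by omega)]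
  exact core (byteOf n) (byteOf_lt n)
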